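-- pv_equiv track=rewrite | github.com/DreamCats/my-plugins | skills-plugins/cninfo-announcement-search/skills/cninfo-announcement-search/scripts/cninfo_client.py | normalize_markets
-- ===== SOURCE A (Python) =====
-- MARKET_MAP = {
--     "sz": "szse",
--     "sh": "sse",
--     "bj": "bse",
--     "szse": "szse",
--     "sse": "sse",
--     "bse": "bse",
--     "all": "all",
-- }
--
-- def normalize_markets(markets_raw: str):
--     if not markets_raw:
--         return ["szse", "sse", "bse"]
--     parts = [p.strip().lower() for p in markets_raw.split(",") if p.strip()]
--     out = []
--     for p in parts:
--         mapped = MARKET_MAP.get(p)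
--         if not mapped:
--             out.append(p)
--         elif mapped == "all":
--             out.extend(["szse", "sse", "bse"])
--         else:
--             out.append(mapped)
--     seen = set()
--     uniq = []
--     for m in out:
--         if m not in seen:
--             seen.add(m)
--             uniq.append(m)
--     return uniq
-- ===== SOURCE B (Python) =====
-- _EXPAND = {
--     "sz": ["szse"],
--     "sh": ["sse"],
--     "bj": ["bse"],
--     "szse": ["szse"],
--     "sse": ["sse"],
--     "bse": ["bse"],
--     "all": ["szse", "sse", "bse"],
-- }
--
-- def normalize_markets(markets_raw: str):
--     if not markets_raw:
--         return ["szse", "sse", "bse"]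
--     codes = [c
--              for piece in markets_raw.split(",")
--              for p in [piece.strip().lower()] if p
--              for c in _EXPAND.get(p, [p])]
--     result = []
--     for c in reversed(codes):
--         result = [c] + [x for x in result if x != c]
--     return result
-- ===== Notes on version B (the rewrite author's own statement) =====
-- stated objective: alternative
-- what changed: B flattens the cleaned pieces through a single expansion table mapping every alias (including 'all') directly to its code list via one comprehension, then dedups back-to-front by prepending each code and purging its later duplicates with a filter, instead of A's staged filter/map, branching expansion loop and forward seen-set dedup.
import Mathlib
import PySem

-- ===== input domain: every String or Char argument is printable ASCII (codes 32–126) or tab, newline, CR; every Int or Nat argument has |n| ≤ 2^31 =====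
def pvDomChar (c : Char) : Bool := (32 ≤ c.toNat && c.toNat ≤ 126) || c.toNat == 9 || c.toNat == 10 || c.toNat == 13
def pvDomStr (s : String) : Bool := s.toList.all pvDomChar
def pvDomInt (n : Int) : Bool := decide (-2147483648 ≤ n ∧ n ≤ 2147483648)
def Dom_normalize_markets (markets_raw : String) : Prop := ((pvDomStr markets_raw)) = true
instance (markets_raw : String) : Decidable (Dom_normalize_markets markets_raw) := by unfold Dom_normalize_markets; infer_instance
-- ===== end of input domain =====

-- B replaces A's three stages (filter/map comprehension, branching expansion loop, forward
-- seen-set dedup) by one flattening comprehension through a direct alias→code-list table and a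
-- back-to-front dedup that prepends each code and purges its later duplicates; objective: alternative.

-- ===== PORT A =====
def pvMarketMap : PySem.Dict String String :=
  PySem.Dict.ofList [("sz","szse"),("sh","sse"),("bj","bse"),
                     ("szse","szse"),("sse","sse"),("bse","bse"),("all","all")]

def normalize_markets (markets_raw : String) : List String :=
  if markets_raw = "" then ["szse","sse","bse"]
  else
    let parts := (((PySem.Str.split? markets_raw ",").getD []).filter
                    (fun p => !(PySem.Str.strip p = ""))).map
                  (fun p => PySem.Str.lower (PySem.Str.strip p))
    let out := parts.foldl (fun out p =>
      match pvMarketMap.get? p with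
      | none => out ++ [p]
      | some mapped => if mapped = "all" then out ++ ["szse","sse","bse"] else out ++ [mapped]) []
    let su := out.foldl (fun (su : PySem.Set String × List String) m =>
      if PySem.Set.contains su.1 m then su else (PySem.Set.add su.1 m, su.2 ++ [m]))
      (PySem.Set.empty, [])
    su.2

-- ===== PORT B =====
def pvExpandTbl : PySem.Dict String (List String) :=
  PySem.Dict.ofList [("sz",["szse"]),("sh",["sse"]),("bj",["bse"]),
                     ("szse",["szse"]),("sse",["sse"]),("bse",["bse"]),
                     ("all",["szse","sse","bse"])]

def normalize_markets_alt (markets_raw : String) : List String :=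
  if markets_raw = "" then ["szse","sse","bse"]
  else
    let codes := ((PySem.Str.split? markets_raw ",").getD []).flatMap (fun piece =>
      let p := PySem.Str.lower (PySem.Str.strip piece)
      if p = "" then [] else pvExpandTbl.getD p [p])
    codes.foldr (fun c result => c :: result.filter (fun x => x ≠ c)) []

-- ===== PRECONDITION & SPEC =====
def Spec_normalize_markets (markets_raw : String) (out : List String) : Prop := out = normalize_markets_alt markets_raw
instance (markets_raw : String) (out : List String) : Decidable (Spec_normalize_markets markets_raw out) := by unfold Spec_normalize_markets; infer_instance

-- ===== CLAIM (what is proved, stated in full; the proofs are below) =====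
def Claim_equal_normalize_markets : Prop := ∀ (markets_raw : String), Dom_normalize_markets markets_raw → Spec_normalize_markets markets_raw (normalize_markets markets_raw)

-- ===== LEMMAS AND PROOFS =====

-- A's expansion of one cleaned part
def pvExpandA (p : String) : List String :=
  match pvMarketMap.get? p with
  | none => [p]
  | some mapped => if mapped = "all" then ["szse","sse","bse"] else [mapped]

-- forward dedup-insertion step (A's collapsed (seen, uniq) fold)
def pvIns (r : List String) (c : String) : List String :=
  if r.contains c then r else r ++ [c]

-- B's back-to-front dedup step
def pvPurge (c : String) (result : List String) : List String :=
  c :: result.filter (fun x => x ≠ c)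

def pvPairs : List (String × String) :=
  [("sz","szse"),("sh","sse"),("bj","bse"),("szse","szse"),("sse","sse"),("bse","bse"),("all","all")]

-- per cleaned part, A's branching dict lookup = B's direct table lookup
theorem pvExpand_eq (p : String) : pvExpandA p = pvExpandTbl.getD p [p] := by
  unfold pvExpandA
  have hm : pvMarketMap = PySem.Dict.mk pvPairs := by decide
  have ht : pvExpandTbl = PySem.Dict.mk
      (pvPairs.map (fun q => (q.1, if q.2 = "all" then ["szse","sse","bse"] else [q.2]))) := by decide
  rw [hm, ht]
  simp only [PySem.Dict.get?, PySem.Dict.getD, List.find?_map]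
  cases hf : List.find? (fun q => q.1 == p) pvPairs with
  | none =>
    have : List.find? ((fun q => q.1 == p) ∘
        (fun q : String × String => (q.1, if q.2 = "all" then ["szse","sse","bse"] else [q.2]))) pvPairs = none := by
      rw [← hf]; rfl
    simp [this]
  | some q =>
    have : List.find? ((fun q => q.1 == p) ∘
        (fun q : String × String => (q.1, if q.2 = "all" then ["szse","sse","bse"] else [q.2]))) pvPairs = some q := by
      rw [← hf]; rfl
    simp only [this, Option.map_some]
    split <;> simp_all

-- A's (seen, uniq) dedup state keeps seen = uniq, so the pair fold collapses to a fold with pvIns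
theorem pvDedup_collapse (out : List String) (r : List String) :
    (out.foldl (fun (su : PySem.Set String × List String) m =>
      if PySem.Set.contains su.1 m then su else (PySem.Set.add su.1 m, su.2 ++ [m]))
      (r, r)).2 = out.foldl pvIns r := by
  induction out generalizing r with
  | nil => rfl
  | cons m rest ih =>
    simp only [List.foldl_cons]
    by_cases h : PySem.Set.contains r m
    · rw [if_pos h, ih]
      have hr : pvIns r m = r := by
        simp only [pvIns, PySem.Set.contains] at h ⊢
        rw [if_pos h]
      rw [hr]
    · rw [if_neg h]
      have hmem : ¬ m ∈ r := by
        simpa [PySem.Set.contains] using h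
      have ha : PySem.Set.add r m = r ++ [m] := by
        simp [PySem.Set.add, PySem.Set.contains, hmem]
      have hi : pvIns r m = r ++ [m] := by
        simp [pvIns, hmem]
      rw [ha, hi, ih]

-- the forward first-occurrence fold equals the backward prepend-and-purge fold
theorem pvFoldl_ins_eq (l : List String) (r : List String) :
    l.foldl pvIns r = r ++ (l.foldr pvPurge []).filter (fun x => !(r.contains x)) := by
  induction l generalizing r with
  | nil => simp
  | cons c rest ih =>
    simp only [List.foldl_cons, List.foldr_cons, ih, pvPurge, List.filter_cons]
    by_cases h : c ∈ r
    · have hc : pvIns r c = r := by simp [pvIns, h]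
      have hcon : (!(r.contains c)) = false := by simp [h]
      rw [hc, hcon]
      simp only [Bool.false_eq_true, if_false]
      congr 1
      rw [List.filter_filter]
      apply List.filter_congr
      intro x _
      by_cases hx : x = c
      · subst hx; simp [h]
      · simp [hx]
    · have hc : pvIns r c = r ++ [c] := by simp [pvIns, h]
      have hcon : (!(r.contains c)) = true := by simp [h]
      rw [hc, hcon]
      simp only [if_pos trivial, List.append_assoc, List.singleton_append]
      congr 2
      rw [List.filter_filter]
      apply List.filter_congr
      intro x _
      by_cases hx : x = c
      · subst hx; simp
      · simp [hx]

-- lower preserves emptiness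
theorem pvLower_empty_iff (s : String) : (PySem.Str.lower s = "") ↔ s = "" := by
  constructor <;> intro h
  · have h2 := congrArg String.toList h
    simp only [PySem.Str.toList_lower] at h2
    have h3 : s.toList = [] := by
      cases hs : s.toList <;> simp_all [PySem.Chars.lower]
    cases s; simp_all
  · subst h; rfl

-- A's expansion loop over the filtered/mapped parts builds B's flattened code list
theorem pvCodes_eq (l : List String) (acc : List String) :
    ((l.filter (fun p => !(PySem.Str.strip p = ""))).map
        (fun p => PySem.Str.lower (PySem.Str.strip p))).foldl (fun out p =>
      match pvMarketMap.get? p with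
      | none => out ++ [p]
      | some mapped => if mapped = "all" then out ++ ["szse","sse","bse"] else out ++ [mapped]) acc
    = acc ++ l.flatMap (fun piece =>
        let p := PySem.Str.lower (PySem.Str.strip piece)
        if p = "" then [] else pvExpandTbl.getD p [p]) := by
  induction l generalizing acc with
  | nil => simp
  | cons piece rest ih =>
    simp only [List.filter_cons, List.flatMap_cons]
    by_cases h : PySem.Str.strip piece = ""
    · have hp : PySem.Str.lower (PySem.Str.strip piece) = "" := by rw [h]; rfl
      simp only [h, decide_true, Bool.not_true]
      exact ih acc
    · have hp : ¬ PySem.Str.lower (PySem.Str.strip piece) = "" := by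
        simpa [pvLower_empty_iff] using h
      simp only [h, decide_false, Bool.not_false, hp, if_true, if_false, List.map_cons,
        List.foldl_cons]
      rw [ih, ← pvExpand_eq]
      unfold pvExpandA
      cases hm : pvMarketMap.get? (PySem.Str.lower (PySem.Str.strip piece)) with
      | none => simp
      | some mapped =>
        simp only [hm]
        by_cases ha : mapped = "all" <;> simp [ha]

-- ===== VERDICT (by name: the statement is the Claim_ definition above) =====
theorem normalize_markets_spec : Claim_equal_normalize_markets := by
  intro markets_raw _
  unfold Spec_normalize_markets normalize_markets normalize_markets_alt
  by_cases h : markets_raw = ""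
  · simp only [h, if_true]
  · simp only [h, if_false]
    have he : (PySem.Set.empty : PySem.Set String) = ([] : List String) := rfl
    rw [he, pvDedup_collapse, pvCodes_eq, List.nil_append, pvFoldl_ins_eq, List.nil_append]
    simp only [List.contains_nil, Bool.not_false, List.filter_true]
    rfl
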